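-- pv_equiv track=rewrite | github.com/CristinaaPichiu/Web-News-Provenance | backend/Nepr/api/services/sparql_service.py | populate_person
-- ===== SOURCE A (Python) =====
-- def populate_person(result, results):
--     person_data = {
--         "name": None,
--         "@type": None,
--         "jobTitle": None,
--         "address": None,
--         "affiliation": None,
--         "birthDate": None,
--         "birthPlace": None,
--         "deathDate": None,
--         "deathPlace": None,
--         "email": None,
--         "familyName": None,
--         "gender": None,
--         "givenName": None,
--         "nationality": None
--     }
--     subject = result.get('o', {}).get('value')
--     sub_predicates = [result.get('subP', {}).get('value') for result in results if
--                       result.get('o', {}).get('value') == subject]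
--     sub_objects = [result.get('subO', {}).get('value') for result in results if
--                    result.get('o', {}).get('value') == subject]
--     for sub_predicate, sub_object_value in zip(sub_predicates, sub_objects):
--         if sub_predicate == "http://schema.org/name":
--             person_data["name"] = sub_object_value
--         elif sub_predicate == "http://schema.org/@type":
--             person_data["@type"] = sub_object_value
--         elif sub_predicate == "http://schema.org/jobTitle":
--             person_data["jobTitle"] = sub_object_value
--         elif sub_predicate == "http://schema.org/address":
--             person_data["address"] = sub_object_value
--         elif sub_predicate == "http://schema.org/affiliation":
--             person_data["affiliation"] = sub_object_value
--         elif sub_predicate == "http://schema.org/birthDate":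
--             person_data["birthDate"] = sub_object_value
--         elif sub_predicate == "http://schema.org/birthPlace":
--             person_data["birthPlace"] = sub_object_value
--         elif sub_predicate == "http://schema.org/deathDate":
--             person_data["deathDate"] = sub_object_value
--         elif sub_predicate == "http://schema.org/deathPlace":
--             person_data["deathPlace"] = sub_object_value
--         elif sub_predicate == "http://schema.org/email":
--             person_data["email"] = sub_object_value
--         elif sub_predicate == "http://schema.org/familyName":
--             person_data["familyName"] = sub_object_value
--         elif sub_predicate == "http://schema.org/gender":
--             person_data["gender"] = sub_object_value
--         elif sub_predicate == "http://schema.org/givenName":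
--             person_data["givenName"] = sub_object_value
--         elif sub_predicate == "http://schema.org/nationality":
--             person_data["nationality"] = sub_object_value
--     return person_data
-- ===== SOURCE B (Python) =====
-- FIELD_BY_PREDICATE = {
--     "http://schema.org/name": "name",
--     "http://schema.org/@type": "@type",
--     "http://schema.org/jobTitle": "jobTitle",
--     "http://schema.org/address": "address",
--     "http://schema.org/affiliation": "affiliation",
--     "http://schema.org/birthDate": "birthDate",
--     "http://schema.org/birthPlace": "birthPlace",
--     "http://schema.org/deathDate": "deathDate",
--     "http://schema.org/deathPlace": "deathPlace",
--     "http://schema.org/email": "email",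
--     "http://schema.org/familyName": "familyName",
--     "http://schema.org/gender": "gender",
--     "http://schema.org/givenName": "givenName",
--     "http://schema.org/nationality": "nationality",
-- }
--
-- PERSON_KEYS = ("name", "@type", "jobTitle", "address", "affiliation",
--                "birthDate", "birthPlace", "deathDate", "deathPlace",
--                "email", "familyName", "gender", "givenName", "nationality")
--
--
-- def populate_person(result, results):
--     person_data = dict.fromkeys(PERSON_KEYS, None)
--     subject = result.get('o', {}).get('value')
--     for row in results:
--         if row.get('o', {}).get('value') == subject:
--             field = FIELD_BY_PREDICATE.get(row.get('subP', {}).get('value'))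
--             if field is not None:
--                 person_data[field] = row.get('subO', {}).get('value')
--     return person_data
-- ===== Notes on version B (the rewrite author's own statement) =====
-- stated objective: simpler
-- what changed: Replaces A's two filtered list comprehensions + zip + 14-branch if/elif chain with a single pass over results using a module-level predicate-URI-to-field lookup table.
import Mathlib
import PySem

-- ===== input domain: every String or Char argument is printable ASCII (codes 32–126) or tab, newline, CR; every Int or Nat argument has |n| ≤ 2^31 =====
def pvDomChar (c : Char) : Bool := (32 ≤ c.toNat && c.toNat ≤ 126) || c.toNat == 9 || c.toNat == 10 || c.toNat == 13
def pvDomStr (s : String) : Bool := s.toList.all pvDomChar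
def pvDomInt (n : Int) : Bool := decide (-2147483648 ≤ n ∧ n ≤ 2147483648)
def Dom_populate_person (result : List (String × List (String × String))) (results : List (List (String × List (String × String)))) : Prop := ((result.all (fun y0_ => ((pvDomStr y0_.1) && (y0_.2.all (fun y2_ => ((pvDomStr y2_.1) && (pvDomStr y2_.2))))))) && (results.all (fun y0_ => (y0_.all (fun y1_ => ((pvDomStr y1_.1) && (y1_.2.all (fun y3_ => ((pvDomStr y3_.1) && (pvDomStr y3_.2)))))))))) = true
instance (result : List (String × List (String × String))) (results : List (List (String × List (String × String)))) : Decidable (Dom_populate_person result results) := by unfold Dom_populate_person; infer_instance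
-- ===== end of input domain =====

-- B replaces A's two filtered comprehensions + zip + 14-branch if/elif chain by a single pass over
-- `results` with a predicate→field lookup table (objective: simpler).


-- shared helper: row.get(k, {}).get('value')  (assoc-list lookup = first match, per the type convention)
def getVal (d : List (String × List (String × String))) (k : String) : Option String :=
  match d.find? (fun p => p.1 == k) with
  | some (_, inner) => (inner.find? (fun p => p.1 == "value")).map (·.2)
  | none => none

-- the initial person_data dict (14 keys, literal order)
def initPerson : PySem.Dict String (Option String) :=
  PySem.Dict.mk [("name", none), ("@type", none), ("jobTitle", none), ("address", none),
    ("affiliation", none), ("birthDate", none), ("birthPlace", none), ("deathDate", none),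
    ("deathPlace", none), ("email", none), ("familyName", none), ("gender", none),
    ("givenName", none), ("nationality", none)]

-- ===== PORT A =====
-- A's loop body: the if/elif chain over (sub_predicate, sub_object_value)
def stepA (d : PySem.Dict String (Option String)) (po : Option String × Option String) :
    PySem.Dict String (Option String) :=
  if po.1 = some "http://schema.org/name" then d.insert "name" po.2
  else if po.1 = some "http://schema.org/@type" then d.insert "@type" po.2
  else if po.1 = some "http://schema.org/jobTitle" then d.insert "jobTitle" po.2
  else if po.1 = some "http://schema.org/address" then d.insert "address" po.2
  else if po.1 = some "http://schema.org/affiliation" then d.insert "affiliation" po.2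
  else if po.1 = some "http://schema.org/birthDate" then d.insert "birthDate" po.2
  else if po.1 = some "http://schema.org/birthPlace" then d.insert "birthPlace" po.2
  else if po.1 = some "http://schema.org/deathDate" then d.insert "deathDate" po.2
  else if po.1 = some "http://schema.org/deathPlace" then d.insert "deathPlace" po.2
  else if po.1 = some "http://schema.org/email" then d.insert "email" po.2
  else if po.1 = some "http://schema.org/familyName" then d.insert "familyName" po.2
  else if po.1 = some "http://schema.org/gender" then d.insert "gender" po.2
  else if po.1 = some "http://schema.org/givenName" then d.insert "givenName" po.2
  else if po.1 = some "http://schema.org/nationality" then d.insert "nationality" po.2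
  else d

def populate_person (result : List (String × List (String × String))) (results : List (List (String × List (String × String)))) : List (String × Option String) :=
  let subject := getVal result "o"
  let sub_predicates := (results.filter (fun r => getVal r "o" == subject)).map (fun r => getVal r "subP")
  let sub_objects := (results.filter (fun r => getVal r "o" == subject)).map (fun r => getVal r "subO")
  ((sub_predicates.zip sub_objects).foldl stepA initPerson).items

-- ===== PORT B =====
def fieldByPredicate : List (String × String) :=
  [("http://schema.org/name", "name"), ("http://schema.org/@type", "@type"),
   ("http://schema.org/jobTitle", "jobTitle"), ("http://schema.org/address", "address"),
   ("http://schema.org/affiliation", "affiliation"), ("http://schema.org/birthDate", "birthDate"),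
   ("http://schema.org/birthPlace", "birthPlace"), ("http://schema.org/deathDate", "deathDate"),
   ("http://schema.org/deathPlace", "deathPlace"), ("http://schema.org/email", "email"),
   ("http://schema.org/familyName", "familyName"), ("http://schema.org/gender", "gender"),
   ("http://schema.org/givenName", "givenName"), ("http://schema.org/nationality", "nationality")]

def populate_person_alt (result : List (String × List (String × String))) (results : List (List (String × List (String × String)))) : List (String × Option String) :=
  let subject := getVal result "o"
  (results.foldl (fun d row =>
      if getVal row "o" == subject then
        match (getVal row "subP").bind
            (fun p => (fieldByPredicate.find? (fun q => q.1 == p)).map (·.2)) with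
        | some field => d.insert field (getVal row "subO")
        | none => d
      else d) initPerson).items

-- ===== PRECONDITION & SPEC =====
def Spec_populate_person (result : List (String × List (String × String))) (results : List (List (String × List (String × String)))) (out : List (String × Option String)) : Prop := out = populate_person_alt result results
instance (result : List (String × List (String × String))) (results : List (List (String × List (String × String)))) (out : List (String × Option String)) : Decidable (Spec_populate_person result results out) := by unfold Spec_populate_person; infer_instance

-- ===== CLAIM (what is proved, stated in full; the proofs are below) =====
def Claim_equal_populate_person : Prop := ∀ (result : List (String × List (String × String))) (results : List (List (String × List (String × String)))), Dom_populate_person result results → Spec_populate_person result results (populate_person result results)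

-- ===== LEMMAS AND PROOFS =====

-- the two loop bodies agree on every row
lemma step_eq (d : PySem.Dict String (Option String)) (p o : Option String) :
    stepA d (p, o) =
      (match p.bind (fun s => (fieldByPredicate.find? (fun q => q.1 == s)).map (·.2)) with
       | some field => d.insert field o
       | none => d) := by
  cases p with
  | none => rfl
  | some s =>
    by_cases h1 : s = "http://schema.org/name"
    · subst h1; rfl
    by_cases h2 : s = "http://schema.org/@type"
    · subst h2; rfl
    by_cases h3 : s = "http://schema.org/jobTitle"
    · subst h3; rfl
    by_cases h4 : s = "http://schema.org/address"
    · subst h4; rfl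
    by_cases h5 : s = "http://schema.org/affiliation"
    · subst h5; rfl
    by_cases h6 : s = "http://schema.org/birthDate"
    · subst h6; rfl
    by_cases h7 : s = "http://schema.org/birthPlace"
    · subst h7; rfl
    by_cases h8 : s = "http://schema.org/deathDate"
    · subst h8; rfl
    by_cases h9 : s = "http://schema.org/deathPlace"
    · subst h9; rfl
    by_cases h10 : s = "http://schema.org/email"
    · subst h10; rfl
    by_cases h11 : s = "http://schema.org/familyName"
    · subst h11; rfl
    by_cases h12 : s = "http://schema.org/gender"
    · subst h12; rfl
    by_cases h13 : s = "http://schema.org/givenName"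
    · subst h13; rfl
    by_cases h14 : s = "http://schema.org/nationality"
    · subst h14; rfl
    simp only [stepA, Option.some.injEq, if_neg h1, if_neg h2, if_neg h3, if_neg h4, if_neg h5, if_neg h6, if_neg h7, if_neg h8, if_neg h9, if_neg h10, if_neg h11, if_neg h12, if_neg h13, if_neg h14, Option.bind_some, fieldByPredicate]
    rw [List.find?_cons_of_neg (by simpa using Ne.symm h1)]
    rw [List.find?_cons_of_neg (by simpa using Ne.symm h2)]
    rw [List.find?_cons_of_neg (by simpa using Ne.symm h3)]
    rw [List.find?_cons_of_neg (by simpa using Ne.symm h4)]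
    rw [List.find?_cons_of_neg (by simpa using Ne.symm h5)]
    rw [List.find?_cons_of_neg (by simpa using Ne.symm h6)]
    rw [List.find?_cons_of_neg (by simpa using Ne.symm h7)]
    rw [List.find?_cons_of_neg (by simpa using Ne.symm h8)]
    rw [List.find?_cons_of_neg (by simpa using Ne.symm h9)]
    rw [List.find?_cons_of_neg (by simpa using Ne.symm h10)]
    rw [List.find?_cons_of_neg (by simpa using Ne.symm h11)]
    rw [List.find?_cons_of_neg (by simpa using Ne.symm h12)]
    rw [List.find?_cons_of_neg (by simpa using Ne.symm h13)]
    rw [List.find?_cons_of_neg (by simpa using Ne.symm h14)]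
    simp

-- ===== VERDICT (by name: the statement is the Claim_ definition above) =====
theorem populate_person_spec : Claim_equal_populate_person := by
  intro result results _
  unfold Spec_populate_person populate_person populate_person_alt
  simp only [List.zip_map', List.foldl_map, List.foldl_filter]
  congr 1
  apply PySem.List.foldl_congr_mem
  intro d r _
  by_cases h : (getVal r "o" == getVal result "o") = true
  · simp only [h, if_true, step_eq]
  · simp only [h, if_false, Bool.false_eq_true]
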